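-- pv_equiv track=rewrite | github.com/japiirainen/aoc-2024 | solutions/14p2.py | calc_togetherness
-- ===== SOURCE A (Python) =====
-- def calc_togetherness(a):
--     t = 0
--     for i in range(len(a)):
--         for j in range(len(a[0])):
--             if a[i][j] != "#":
--                 continue
--             for dx, dy in [(0, -1), (0, 1), (-1, 0), (1, 0)]:
--                 nx, ny = (i + dx, j + dy)
--                 if 0 <= nx < len(a) and 0 <= ny < len(a[0]) and a[nx][ny] == "#":
--                     t += 1
--                     break
--     return t
-- ===== SOURCE B (Python) =====
-- def calc_togetherness(a):
--     marked = set()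
--     for i in range(len(a)):
--         for j in range(len(a[0])):
--             if a[i][j] != "#":
--                 continue
--             if j + 1 < len(a[0]) and a[i][j + 1] == "#":
--                 marked.add((i, j))
--                 marked.add((i, j + 1))
--             if i + 1 < len(a) and a[i + 1][j] == "#":
--                 marked.add((i, j))
--                 marked.add((i + 1, j))
--     return len(marked)
-- ===== Notes on version B (the rewrite author's own statement) =====
-- stated objective: alternative
-- what changed: Instead of scanning all four neighbours of every '#' cell with a break-loop counter, B builds a set of marked coordinates by examining each right/down adjacency once and marking both endpoints, returning the set's size.
import Mathlib
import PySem

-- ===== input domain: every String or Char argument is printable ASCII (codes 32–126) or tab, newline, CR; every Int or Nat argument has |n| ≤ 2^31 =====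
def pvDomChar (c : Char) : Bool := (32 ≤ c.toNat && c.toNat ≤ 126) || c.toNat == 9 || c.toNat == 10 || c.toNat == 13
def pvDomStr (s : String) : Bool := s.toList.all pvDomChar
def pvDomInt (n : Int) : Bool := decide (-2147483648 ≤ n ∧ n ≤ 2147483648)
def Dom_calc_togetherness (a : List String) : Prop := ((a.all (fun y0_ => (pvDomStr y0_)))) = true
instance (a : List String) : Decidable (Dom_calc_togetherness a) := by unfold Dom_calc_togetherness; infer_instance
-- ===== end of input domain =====

set_option maxHeartbeats 1600000

-- B replaces A's four-direction break-loop counter by a marked-coordinate set filled from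
-- right/down adjacencies (objective: alternative); return values proved equal on Pre_.

-- ===== PORT A =====
-- a[i][j] (indices in range under Pre_; shared accessor for both ports)
def pvAt (a : List String) (i j : Int) : Char :=
  PySem.List.pyGetD (PySem.List.pyGetD a i "").toList j ' '

def pvDirs : List (Int × Int) := [(0, -1), (0, 1), (-1, 0), (1, 0)]

-- the 'for dx, dy in …: … break' loop of A
def pvBreakLoop (a : List String) (n w i j : Int) : List (Int × Int) → Int → Int
  | [], t => t
  | d :: rest, t =>
    if 0 ≤ i + d.1 ∧ i + d.1 < n ∧ 0 ≤ j + d.2 ∧ j + d.2 < w ∧ pvAt a (i + d.1) (j + d.2) = '#'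
    then t + 1
    else pvBreakLoop a n w i j rest t

def calc_togetherness (a : List String) : Int :=
  let n : Int := PySem.List.len a
  let w : Int := PySem.Str.len (PySem.List.pyGetD a 0 "")
  (PySem.List.pyRange 0 n 1).foldl (fun t i =>
    (PySem.List.pyRange 0 w 1).foldl (fun t j =>
      if pvAt a i j ≠ '#' then t
      else pvBreakLoop a n w i j pvDirs t) t) 0

-- ===== PORT B =====
def calc_togetherness_alt (a : List String) : Int :=
  let n : Int := PySem.List.len a
  let w : Int := PySem.Str.len (PySem.List.pyGetD a 0 "")
  let marked : PySem.Set (Int × Int) :=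
    (PySem.List.pyRange 0 n 1).foldl (fun s i =>
      (PySem.List.pyRange 0 w 1).foldl (fun s j =>
        if pvAt a i j ≠ '#' then s
        else
          let s := if j + 1 < w ∧ pvAt a i (j + 1) = '#'
                   then PySem.Set.add (PySem.Set.add s (i, j)) (i, j + 1) else s
          if i + 1 < n ∧ pvAt a (i + 1) j = '#'
          then PySem.Set.add (PySem.Set.add s (i, j)) (i + 1, j) else s) s)
      PySem.Set.empty
  PySem.Set.len marked

-- ===== PRECONDITION & SPEC =====
-- Pre_ excludes exactly the grids on which Python A raises IndexError: a non-empty grid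
-- some of whose rows are shorter than the first row (A indexes every row at columns < len(a[0])).
def Pre_calc_togetherness (a : List String) : Prop :=
  ∀ s ∈ a, (a.headD "").toList.length ≤ s.toList.length
instance (a : List String) : Decidable (Pre_calc_togetherness a) := by
  unfold Pre_calc_togetherness; infer_instance

def pvWitness_calc_togetherness : List String := ["##", ".#"]

def Spec_calc_togetherness (a : List String) (out : Int) : Prop := out = calc_togetherness_alt a
instance (a : List String) (out : Int) : Decidable (Spec_calc_togetherness a out) := by
  unfold Spec_calc_togetherness; infer_instance

-- ===== CLAIM (what is proved, stated in full; the proofs are below) =====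
def Claim_equal_calc_togetherness : Prop := ∀ (a : List String), Dom_calc_togetherness a → Pre_calc_togetherness a → Spec_calc_togetherness a (calc_togetherness a)

-- ===== LEMMAS AND PROOFS =====

-- cell (i, j) is in range and holds '#'
def pvHP (a : List String) (n w i j : Int) : Prop :=
  0 ≤ i ∧ i < n ∧ 0 ≤ j ∧ j < w ∧ pvAt a i j = '#'

-- cell (i, j) holds '#' and has an in-range '#' neighbour
def pvGoodP (a : List String) (n w i j : Int) : Prop :=
  pvHP a n w i j ∧
    (pvHP a n w i (j - 1) ∨ pvHP a n w i (j + 1) ∨ pvHP a n w (i - 1) j ∨ pvHP a n w (i + 1) j)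

def pvGood (a : List String) (n w : Int) (p : Int × Int) : Bool :=
  decide (0 ≤ p.1 ∧ p.1 < n ∧ 0 ≤ p.2 ∧ p.2 < w ∧ pvAt a p.1 p.2 = '#') &&
  (decide (0 ≤ p.1 ∧ p.1 < n ∧ 0 ≤ p.2 - 1 ∧ p.2 - 1 < w ∧ pvAt a p.1 (p.2 - 1) = '#') ||
   decide (0 ≤ p.1 ∧ p.1 < n ∧ 0 ≤ p.2 + 1 ∧ p.2 + 1 < w ∧ pvAt a p.1 (p.2 + 1) = '#') ||
   decide (0 ≤ p.1 - 1 ∧ p.1 - 1 < n ∧ 0 ≤ p.2 ∧ p.2 < w ∧ pvAt a (p.1 - 1) p.2 = '#') ||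
   decide (0 ≤ p.1 + 1 ∧ p.1 + 1 < n ∧ 0 ≤ p.2 ∧ p.2 < w ∧ pvAt a (p.1 + 1) p.2 = '#'))

theorem pvGood_iff (a : List String) (n w : Int) (p : Int × Int) :
    pvGood a n w p = true ↔ pvGoodP a n w p.1 p.2 := by
  simp only [pvGood, pvGoodP, pvHP, Bool.and_eq_true, Bool.or_eq_true, decide_eq_true_eq,
    or_assoc]

-- what one iteration of B's inner loop adds for cell (i, j)
def pvQ (a : List String) (n w i j : Int) (p : Int × Int) : Prop :=
  pvAt a i j = '#' ∧
    ((j + 1 < w ∧ pvAt a i (j + 1) = '#' ∧ (p = (i, j) ∨ p = (i, j + 1))) ∨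
     (i + 1 < n ∧ pvAt a (i + 1) j = '#' ∧ (p = (i, j) ∨ p = (i + 1, j))))

-- the canonical (row-major, duplicate-free) list of cells with a '#' neighbour
def pvCells (a : List String) (n w : Int) : List (Int × Int) :=
  (PySem.List.pyRange 0 n 1).flatMap (fun i =>
    ((PySem.List.pyRange 0 w 1).filter (fun j => pvGood a n w (i, j))).map (fun j => (i, j)))

-- generic: membership in a fold of set-growing steps
theorem pv_mem_foldl {α β : Type} [BEq β] (step : PySem.Set β → α → PySem.Set β)
    (Q : α → β → Prop) (h : ∀ s x p, p ∈ step s x ↔ p ∈ s ∨ Q x p) :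
    ∀ (l : List α) (s₀ : PySem.Set β) (p : β),
      p ∈ l.foldl step s₀ ↔ p ∈ s₀ ∨ ∃ x ∈ l, Q x p := by
  intro l
  induction l with
  | nil => intro s₀ p; simp
  | cons x l ih =>
    intro s₀ p
    simp only [List.foldl_cons, ih, h, List.mem_cons]
    constructor
    · rintro ((hp | hq) | ⟨y, hy, hq⟩)
      · exact Or.inl hp
      · exact Or.inr ⟨x, Or.inl rfl, hq⟩
      · exact Or.inr ⟨y, Or.inr hy, hq⟩
    · rintro (hp | ⟨y, (rfl | hy), hq⟩)
      · exact Or.inl (Or.inl hp)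
      · exact Or.inl (Or.inr hq)
      · exact Or.inr ⟨y, hy, hq⟩

-- generic: nodup is preserved by a fold of nodup-preserving steps
theorem pv_nodup_foldl {α β : Type} (step : List β → α → List β)
    (h : ∀ s x, List.Nodup s → List.Nodup (step s x)) :
    ∀ (l : List α) (s₀ : List β), List.Nodup s₀ → List.Nodup (l.foldl step s₀) := by
  intro l
  induction l with
  | nil => intro s₀ hs; simpa using hs
  | cons x l ih => intro s₀ hs; exact ih (step s₀ x) (h s₀ x hs)

theorem pvBreakLoop_eq (a : List String) (n w i j t : Int)
    (hi0 : 0 ≤ i) (hin : i < n) (hj0 : 0 ≤ j) (hjw : j < w) (hat : pvAt a i j = '#') :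
    pvBreakLoop a n w i j pvDirs t = t + (if pvGood a n w (i, j) = true then 1 else 0) := by
  have hg : (pvGood a n w (i, j) = true) ↔
      ((0 ≤ i ∧ i < n ∧ 0 ≤ j - 1 ∧ j - 1 < w ∧ pvAt a i (j - 1) = '#') ∨
       (0 ≤ i ∧ i < n ∧ 0 ≤ j + 1 ∧ j + 1 < w ∧ pvAt a i (j + 1) = '#') ∨
       (0 ≤ i - 1 ∧ i - 1 < n ∧ 0 ≤ j ∧ j < w ∧ pvAt a (i - 1) j = '#') ∨
       (0 ≤ i + 1 ∧ i + 1 < n ∧ 0 ≤ j ∧ j < w ∧ pvAt a (i + 1) j = '#')) := by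
    rw [pvGood_iff]
    exact ⟨fun h => h.2, fun h => ⟨⟨hi0, hin, hj0, hjw, hat⟩, h⟩⟩
  have e0 : pvBreakLoop a n w i j pvDirs t =
      (if 0 ≤ i + 0 ∧ i + 0 < n ∧ 0 ≤ j + -1 ∧ j + -1 < w ∧ pvAt a (i + 0) (j + -1) = '#' then t + 1 else
       if 0 ≤ i + 0 ∧ i + 0 < n ∧ 0 ≤ j + 1 ∧ j + 1 < w ∧ pvAt a (i + 0) (j + 1) = '#' then t + 1 else
       if 0 ≤ i + -1 ∧ i + -1 < n ∧ 0 ≤ j + 0 ∧ j + 0 < w ∧ pvAt a (i + -1) (j + 0) = '#' then t + 1 else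
       if 0 ≤ i + 1 ∧ i + 1 < n ∧ 0 ≤ j + 0 ∧ j + 0 < w ∧ pvAt a (i + 1) (j + 0) = '#' then t + 1 else t) := rfl
  rw [e0, show i + (0 : Int) = i from add_zero i, show j + (0 : Int) = j from add_zero j,
    show j + (-1 : Int) = j - 1 from (sub_eq_add_neg j 1).symm,
    show i + (-1 : Int) = i - 1 from (sub_eq_add_neg i 1).symm]
  clear e0
  by_cases h1 : 0 ≤ i ∧ i < n ∧ 0 ≤ j - 1 ∧ j - 1 < w ∧ pvAt a i (j - 1) = '#'
  · rw [if_pos h1, if_pos (hg.mpr (Or.inl h1))]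
  · rw [if_neg h1]
    by_cases h2 : 0 ≤ i ∧ i < n ∧ 0 ≤ j + 1 ∧ j + 1 < w ∧ pvAt a i (j + 1) = '#'
    · rw [if_pos h2, if_pos (hg.mpr (Or.inr (Or.inl h2)))]
    · rw [if_neg h2]
      by_cases h3 : 0 ≤ i - 1 ∧ i - 1 < n ∧ 0 ≤ j ∧ j < w ∧ pvAt a (i - 1) j = '#'
      · rw [if_pos h3, if_pos (hg.mpr (Or.inr (Or.inr (Or.inl h3))))]
      · rw [if_neg h3]
        by_cases h4 : 0 ≤ i + 1 ∧ i + 1 < n ∧ 0 ≤ j ∧ j < w ∧ pvAt a (i + 1) j = '#'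
        · rw [if_pos h4, if_pos (hg.mpr (Or.inr (Or.inr (Or.inr h4))))]
        · rw [if_neg h4, if_neg (fun hG => by
            rcases hg.mp hG with h | h | h | h
            · exact h1 h
            · exact h2 h
            · exact h3 h
            · exact h4 h), add_zero]

-- A's nested loops compute the sum of goodness indicators over the grid
theorem pvA_sum (a : List String) (n w : Int) :
    (PySem.List.pyRange 0 n 1).foldl (fun t i =>
      (PySem.List.pyRange 0 w 1).foldl (fun t j =>
        if pvAt a i j ≠ '#' then t
        else pvBreakLoop a n w i j pvDirs t) t) 0
    = ((PySem.List.pyRange 0 n 1).map (fun i =>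
        ((PySem.List.pyRange 0 w 1).map (fun j =>
          if pvGood a n w (i, j) = true then (1 : Int) else 0)).sum)).sum := by
  have inner : ∀ (i : Int), 0 ≤ i → i < n → ∀ (t : Int),
      (PySem.List.pyRange 0 w 1).foldl (fun t j =>
        if pvAt a i j ≠ '#' then t else pvBreakLoop a n w i j pvDirs t) t
      = t + ((PySem.List.pyRange 0 w 1).map
          (fun j => if pvGood a n w (i, j) = true then (1 : Int) else 0)).sum := by
    intro i hi0 hin t
    rw [← PySem.List.foldl_add (PySem.List.pyRange 0 w 1)
        (fun j => if pvGood a n w (i, j) = true then (1 : Int) else 0) t]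
    apply PySem.List.foldl_congr_mem
    intro acc j hj
    rw [PySem.List.mem_pyRange_one] at hj
    by_cases hat : pvAt a i j = '#'
    · rw [if_neg (not_not_intro hat)]
      exact pvBreakLoop_eq a n w i j acc hi0 hin hj.1 hj.2 hat
    · rw [if_pos hat]
      have hg : ¬ (pvGood a n w (i, j) = true) := by
        rw [pvGood_iff]
        rintro ⟨⟨_, _, _, _, hc⟩, _⟩
        exact hat hc
      rw [if_neg hg, add_zero]
  rw [← zero_add (((PySem.List.pyRange 0 n 1).map (fun i =>
        ((PySem.List.pyRange 0 w 1).map (fun j =>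
          if pvGood a n w (i, j) = true then (1 : Int) else 0)).sum)).sum),
      ← PySem.List.foldl_add (PySem.List.pyRange 0 n 1)
      (fun i => ((PySem.List.pyRange 0 w 1).map
        (fun j => if pvGood a n w (i, j) = true then (1 : Int) else 0)).sum) 0]
  apply PySem.List.foldl_congr_mem
  intro acc i hi
  rw [PySem.List.mem_pyRange_one] at hi
  exact inner i hi.1 hi.2 acc

-- membership in B's marked set, as "some processed cell marked p"
theorem pvB_mem (a : List String) (n w : Int) (p : Int × Int) :
    (p ∈ (PySem.List.pyRange 0 n 1).foldl (fun s i =>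
        (PySem.List.pyRange 0 w 1).foldl (fun s j =>
          if pvAt a i j ≠ '#' then s
          else
            let s := if j + 1 < w ∧ pvAt a i (j + 1) = '#'
                     then PySem.Set.add (PySem.Set.add s (i, j)) (i, j + 1) else s
            if i + 1 < n ∧ pvAt a (i + 1) j = '#'
            then PySem.Set.add (PySem.Set.add s (i, j)) (i + 1, j) else s) s)
        PySem.Set.empty) ↔
      ∃ i ∈ PySem.List.pyRange 0 n 1, ∃ j ∈ PySem.List.pyRange 0 w 1, pvQ a n w i j p := by
  have hinner : ∀ (i : Int) (s : PySem.Set (Int × Int)) (j : Int) (q : Int × Int),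
      (q ∈ (fun (s : PySem.Set (Int × Int)) (j : Int) =>
        if pvAt a i j ≠ '#' then s
        else
          let s := if j + 1 < w ∧ pvAt a i (j + 1) = '#'
                   then PySem.Set.add (PySem.Set.add s (i, j)) (i, j + 1) else s
          if i + 1 < n ∧ pvAt a (i + 1) j = '#'
          then PySem.Set.add (PySem.Set.add s (i, j)) (i + 1, j) else s) s j) ↔
      q ∈ s ∨ pvQ a n w i j q := by
    intro i s j q
    dsimp only
    by_cases hat : pvAt a i j = '#'
    · rw [if_neg (not_not_intro hat)]
      split_ifs with hR hD <;> simp only [PySem.Set.mem_add, pvQ] <;> tauto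
    · rw [if_pos hat]
      simp [pvQ, hat]
  rw [pv_mem_foldl _ (fun i q => ∃ j ∈ PySem.List.pyRange 0 w 1, pvQ a n w i j q)
      (fun s i q => pv_mem_foldl _ (pvQ a n w i) (hinner i) _ s q)]
  simp [PySem.Set.empty]

theorem pvB_nodup (a : List String) (n w : Int) :
    List.Nodup ((PySem.List.pyRange 0 n 1).foldl (fun s i =>
        (PySem.List.pyRange 0 w 1).foldl (fun s j =>
          if pvAt a i j ≠ '#' then s
          else
            let s := if j + 1 < w ∧ pvAt a i (j + 1) = '#'
                     then PySem.Set.add (PySem.Set.add s (i, j)) (i, j + 1) else s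
            if i + 1 < n ∧ pvAt a (i + 1) j = '#'
            then PySem.Set.add (PySem.Set.add s (i, j)) (i + 1, j) else s) s)
        PySem.Set.empty) := by
  refine pv_nodup_foldl _ ?_ _ _ List.Pairwise.nil
  intro s i hs
  refine pv_nodup_foldl _ ?_ _ _ hs
  intro s j hs
  dsimp only
  split_ifs <;> (repeat apply PySem.Set.nodup_add) <;> exact hs

-- "some processed cell marked p" ↔ "p is a '#' cell with a '#' neighbour"
theorem pvQ_exists_iff (a : List String) (n w : Int) (p : Int × Int) :
    (∃ i ∈ PySem.List.pyRange 0 n 1, ∃ j ∈ PySem.List.pyRange 0 w 1, pvQ a n w i j p) ↔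
    pvGoodP a n w p.1 p.2 := by
  obtain ⟨x, y⟩ := p
  simp only [PySem.List.mem_pyRange_one, pvQ, pvGoodP, pvHP]
  constructor
  · rintro ⟨i, ⟨hi0, hin⟩, j, ⟨hj0, hjw⟩, hat, hcase⟩
    rcases hcase with ⟨hjw1, hat1, hp | hp⟩ | ⟨hin1, hat1, hp | hp⟩ <;>
      (simp only [Prod.mk.injEq] at hp; obtain ⟨rfl, rfl⟩ := hp)
    · exact ⟨⟨hi0, hin, hj0, hjw, hat⟩, Or.inr (Or.inl ⟨hi0, hin, by omega, hjw1, hat1⟩)⟩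
    · refine ⟨⟨hi0, hin, by omega, hjw1, hat1⟩, Or.inl ?_⟩
      rw [show j + 1 - 1 = j by ring]
      exact ⟨hi0, hin, hj0, hjw, hat⟩
    · exact ⟨⟨hi0, hin, hj0, hjw, hat⟩, Or.inr (Or.inr (Or.inr ⟨by omega, hin1, hj0, hjw, hat1⟩))⟩
    · refine ⟨⟨by omega, hin1, hj0, hjw, hat1⟩, Or.inr (Or.inr (Or.inl ?_))⟩
      rw [show i + 1 - 1 = i by ring]
      exact ⟨hi0, hin, hj0, hjw, hat⟩
  · rintro ⟨⟨hx0, hxn, hy0, hyw, hat⟩, hnb⟩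
    rcases hnb with ⟨h1, h2, h3, h4, h5⟩ | ⟨h1, h2, h3, h4, h5⟩ | ⟨h1, h2, h3, h4, h5⟩ | ⟨h1, h2, h3, h4, h5⟩
    · -- left neighbour: cell (x, y-1) has a right edge marking p = (x, y)
      refine ⟨x, ⟨hx0, hxn⟩, y - 1, ⟨h3, by omega⟩, h5, Or.inl ⟨by omega, ?_, Or.inr ?_⟩⟩
      · rw [show y - 1 + 1 = y by ring]; exact hat
      · rw [show y - 1 + 1 = y by ring]
    · exact ⟨x, ⟨hx0, hxn⟩, y, ⟨hy0, hyw⟩, hat, Or.inl ⟨h4, h5, Or.inl rfl⟩⟩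
    · -- upper neighbour: cell (x-1, y) has a down edge marking p = (x, y)
      refine ⟨x - 1, ⟨h1, by omega⟩, y, ⟨hy0, hyw⟩, h5, Or.inr ⟨by omega, ?_, Or.inr ?_⟩⟩
      · rw [show x - 1 + 1 = x by ring]; exact hat
      · rw [show x - 1 + 1 = x by ring]
    · exact ⟨x, ⟨hx0, hxn⟩, y, ⟨hy0, hyw⟩, hat, Or.inr ⟨h2, h5, Or.inl rfl⟩⟩

theorem pvCells_mem (a : List String) (n w : Int) (p : Int × Int) :
    p ∈ pvCells a n w ↔ pvGoodP a n w p.1 p.2 := by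
  obtain ⟨x, y⟩ := p
  simp only [pvCells, List.mem_flatMap, List.mem_map, List.mem_filter,
    PySem.List.mem_pyRange_one]
  constructor
  · rintro ⟨i, ⟨hi0, hin⟩, j, ⟨⟨hj0, hjw⟩, hg⟩, he⟩
    simp only [Prod.mk.injEq] at he
    obtain ⟨rfl, rfl⟩ := he
    exact (pvGood_iff a n w (i, j)).mp hg
  · intro hg
    have hb := hg.1
    exact ⟨x, ⟨hb.1, hb.2.1⟩, y, ⟨⟨hb.2.2.1, hb.2.2.2.1⟩, (pvGood_iff a n w (x, y)).mpr hg⟩, rfl⟩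

theorem pvCells_nodup (a : List String) (n w : Int) : (pvCells a n w).Nodup := by
  rw [pvCells, List.nodup_flatMap]
  constructor
  · intro i _
    exact List.Nodup.map (fun j j' h => by simpa using h)
      (List.Nodup.filter _ (PySem.List.nodup_pyRange_one 0 w))
  · refine List.Pairwise.imp ?_ (PySem.List.pairwise_lt_pyRange_one 0 n)
    intro i i' hlt p hp1 hp2
    simp only [List.mem_map] at hp1 hp2
    obtain ⟨j, _, rfl⟩ := hp1
    obtain ⟨j', _, he⟩ := hp2
    simp only [Prod.mk.injEq] at he
    omega

theorem pvSum_eq_len (a : List String) (n w : Int) :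
    ((PySem.List.pyRange 0 n 1).map (fun i =>
      ((PySem.List.pyRange 0 w 1).map (fun j =>
        if pvGood a n w (i, j) = true then (1 : Int) else 0)).sum)).sum
    = ((pvCells a n w).length : Int) := by
  rw [pvCells, List.length_flatMap, Nat.cast_list_sum, List.map_map]
  refine congrArg List.sum (List.map_congr_left ?_)
  intro i _
  simp only [Function.comp_apply]
  rw [PySem.List.sum_map_ite_one_zero, List.countP_eq_length_filter, List.length_map]

-- B = the number of distinct marked cells
theorem pvAlt_eq (a : List String) :
    calc_togetherness_alt a =
      ((pvCells a (PySem.List.len a) (PySem.Str.len (PySem.List.pyGetD a 0 ""))).length : Int) := by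
  have hperm : List.Perm
      ((PySem.List.pyRange 0 (PySem.List.len a) 1).foldl (fun s i =>
        (PySem.List.pyRange 0 (PySem.Str.len (PySem.List.pyGetD a 0 "")) 1).foldl (fun s j =>
          if pvAt a i j ≠ '#' then s
          else
            let s := if j + 1 < PySem.Str.len (PySem.List.pyGetD a 0 "") ∧ pvAt a i (j + 1) = '#'
                     then PySem.Set.add (PySem.Set.add s (i, j)) (i, j + 1) else s
            if i + 1 < PySem.List.len a ∧ pvAt a (i + 1) j = '#'
            then PySem.Set.add (PySem.Set.add s (i, j)) (i + 1, j) else s) s)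
        PySem.Set.empty)
      (pvCells a (PySem.List.len a) (PySem.Str.len (PySem.List.pyGetD a 0 ""))) :=
    (List.perm_ext_iff_of_nodup (pvB_nodup a _ _) (pvCells_nodup a _ _)).mpr (fun p => by
      rw [pvB_mem, pvQ_exists_iff, pvCells_mem])
  have hlen : ∀ s : PySem.Set (Int × Int), PySem.Set.len s = (s.length : Int) := fun s => by
    simp [PySem.Set.len]
  unfold calc_togetherness_alt
  show PySem.Set.len
      ((PySem.List.pyRange 0 (PySem.List.len a) 1).foldl (fun s i =>
        (PySem.List.pyRange 0 (PySem.Str.len (PySem.List.pyGetD a 0 "")) 1).foldl (fun s j =>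
          if pvAt a i j ≠ '#' then s
          else
            let s := if j + 1 < PySem.Str.len (PySem.List.pyGetD a 0 "") ∧ pvAt a i (j + 1) = '#'
                     then PySem.Set.add (PySem.Set.add s (i, j)) (i, j + 1) else s
            if i + 1 < PySem.List.len a ∧ pvAt a (i + 1) j = '#'
            then PySem.Set.add (PySem.Set.add s (i, j)) (i + 1, j) else s) s)
        PySem.Set.empty) = _
  rw [hlen]
  exact_mod_cast hperm.length_eq

-- ===== VERDICT (by name: the statement is the Claim_ definition above) =====
theorem calc_togetherness_spec : Claim_equal_calc_togetherness := by
  intro a _ _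
  unfold Spec_calc_togetherness
  have hA : calc_togetherness a =
      ((PySem.List.pyRange 0 (PySem.List.len a) 1).map (fun i =>
        ((PySem.List.pyRange 0 (PySem.Str.len (PySem.List.pyGetD a 0 "")) 1).map (fun j =>
          if pvGood a (PySem.List.len a) (PySem.Str.len (PySem.List.pyGetD a 0 "")) (i, j) = true
          then (1 : Int) else 0)).sum)).sum := by
    unfold calc_togetherness
    exact pvA_sum a (PySem.List.len a) (PySem.Str.len (PySem.List.pyGetD a 0 ""))
  rw [hA, pvSum_eq_len, pvAlt_eq]
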